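-- pv_equiv track=rewrite | github.com/PARKJAEHYEONG922/naver-integrated-management | integrated_management_system/src/features/prduct_title_generator/engine_local.py | estimate_search_volume
-- ===== SOURCE A (Python) =====
-- from typing import List, Dict, Tuple, Optional
--
-- def estimate_search_volume(title: str, search_volumes: Dict[str, int]) -> int:
--     """제목의 예상 검색량 계산 (이중 집계 방지)"""
--     title_lower = title.lower()
--
--     # 1) 구문(공백 포함) 키워드 우선 집계
--     phrase_hits = {k for k in search_volumes if " " in k and k.lower() in title_lower}
--     total_volume = sum(search_volumes[k] for k in phrase_hits)
--
--     # 2) 구문에 포함된 단일 토큰들 수집 (중복 방지용)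
--     used_tokens = set()
--     for phrase in phrase_hits:
--         used_tokens.update(phrase.lower().split())
--
--     # 3) 단일 토큰 집계 (구문에 포함된 토큰은 제외)
--     for token, volume in search_volumes.items():
--         if " " in token:  # 구문은 이미 처리됨
--             continue
--         if token.lower() in title_lower and token.lower() not in used_tokens:
--             total_volume += volume
--
--     return total_volume
-- ===== SOURCE B (Python) =====
-- def estimate_search_volume(title: str, search_volumes: dict) -> int:
--     """One pass over the keywords: add every match, collecting the matches and the
--     tokens of matched phrases; then subtract the single-token matches subsumed by a phrase."""
--     title_lower = title.lower()
--     total_all = 0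
--     hits = []
--     used_tokens = set()
--     for k, v in search_volumes.items():
--         kl = k.lower()
--         if kl in title_lower:
--             total_all += v
--             hits.append((k, kl, v))
--             if " " in k:
--                 used_tokens.update(kl.split())
--     correction = sum(v for k, kl, v in hits if " " not in k and kl in used_tokens)
--     return total_all - correction
-- ===== Notes on version B (the rewrite author's own statement) =====
-- stated objective: alternative
-- what changed: B inverts A's selective accumulation: it sums every keyword matching the title in one pass, then subtracts the single-token keywords whose lowercase appears among the tokens of a matched phrase, instead of A's phrase-first sum plus a guarded second loop over singles.
import Mathlib
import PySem

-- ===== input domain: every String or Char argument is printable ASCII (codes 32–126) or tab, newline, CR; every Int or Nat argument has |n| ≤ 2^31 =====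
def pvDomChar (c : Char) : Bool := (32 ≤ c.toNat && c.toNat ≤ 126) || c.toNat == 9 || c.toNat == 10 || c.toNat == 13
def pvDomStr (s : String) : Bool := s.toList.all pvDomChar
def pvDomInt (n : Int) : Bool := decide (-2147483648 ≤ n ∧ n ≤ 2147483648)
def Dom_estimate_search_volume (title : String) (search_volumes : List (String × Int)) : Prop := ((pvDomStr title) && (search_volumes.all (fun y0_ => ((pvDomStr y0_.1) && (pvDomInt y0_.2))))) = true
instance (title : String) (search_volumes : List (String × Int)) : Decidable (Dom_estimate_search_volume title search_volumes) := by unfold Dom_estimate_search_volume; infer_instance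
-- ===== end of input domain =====

-- B inverts A's strategy: sum every matching keyword, then subtract the subsumed single tokens (objective: alternative decomposition).


-- ===== PORT A =====
def estimate_search_volume (title : String) (search_volumes : List (String × Int)) : Int :=
  let title_lower := PySem.Str.lower title
  -- {k for k in search_volumes if " " in k and k.lower() in title_lower}
  let phrase_hits : PySem.Set String :=
    PySem.Set.ofList ((search_volumes.map Prod.fst).filter
      (fun k => PySem.Str.isIn " " k && PySem.Str.isIn (PySem.Str.lower k) title_lower))
  let d : PySem.Dict String Int := PySem.Dict.mk search_volumes
  -- total_volume = sum(search_volumes[k] for k in phrase_hits)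
  let total_volume : Int := (phrase_hits.map (fun k => d.getD k 0)).sum
  -- used_tokens built by updating with each phrase's tokens
  let used_tokens : PySem.Set String :=
    phrase_hits.foldl (fun s p => PySem.Set.update s (PySem.Str.split₀ (PySem.Str.lower p)))
      PySem.Set.empty
  -- for token, volume in search_volumes.items(): …
  search_volumes.foldl
    (fun acc tv =>
      if PySem.Str.isIn " " tv.1 then acc
      else if PySem.Str.isIn (PySem.Str.lower tv.1) title_lower
              && !(PySem.Set.contains used_tokens (PySem.Str.lower tv.1)) then acc + tv.2
      else acc)
    total_volume

-- ===== PORT B =====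
def estimate_search_volume_alt (title : String) (search_volumes : List (String × Int)) : Int :=
  let title_lower := PySem.Str.lower title
  -- one pass: total of all matches, the list of matches (with their lowercase), phrase tokens
  let st : Int × List (String × String × Int) × PySem.Set String :=
    search_volumes.foldl
      (fun acc kv =>
        let kl := PySem.Str.lower kv.1
        if PySem.Str.isIn kl title_lower then
          (acc.1 + kv.2, acc.2.1 ++ [(kv.1, kl, kv.2)],
            if PySem.Str.isIn " " kv.1 then PySem.Set.update acc.2.2 (PySem.Str.split₀ kl)
            else acc.2.2)
        else acc)
      (0, [], PySem.Set.empty)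
  -- correction = sum(v for k, kl, v in hits if " " not in k and kl in used_tokens)
  let correction : Int :=
    ((st.2.1.filter (fun t => !PySem.Str.isIn " " t.1 && PySem.Set.contains st.2.2 t.2.1)).map
      (fun t => t.2.2)).sum
  st.1 - correction

-- ===== PRECONDITION & SPEC =====
-- Pre_ requires distinct keys: the Python argument is a dict, whose keys are necessarily distinct,
-- so a duplicate-key association list corresponds to no Python input at all.
def Pre_estimate_search_volume (title : String) (search_volumes : List (String × Int)) : Prop :=
  (search_volumes.map Prod.fst).Nodup
instance (title : String) (search_volumes : List (String × Int)) : Decidable (Pre_estimate_search_volume title search_volumes) := by unfold Pre_estimate_search_volume; infer_instance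
def pvWitness_estimate_search_volume : String × (List (String × Int)) :=
  ("lazy dog house", [("lazy dog", 30), ("dog", 7), ("cat", 5)])

def Spec_estimate_search_volume (title : String) (search_volumes : List (String × Int)) (out : Int) : Prop := out = estimate_search_volume_alt title search_volumes
instance (title : String) (search_volumes : List (String × Int)) (out : Int) : Decidable (Spec_estimate_search_volume title search_volumes out) := by unfold Spec_estimate_search_volume; infer_instance

-- ===== CLAIM (what is proved, stated in full; the proofs are below) =====
def Claim_equal_estimate_search_volume : Prop := ∀ (title : String) (search_volumes : List (String × Int)), Dom_estimate_search_volume title search_volumes → Pre_estimate_search_volume title search_volumes → Spec_estimate_search_volume title search_volumes (estimate_search_volume title search_volumes)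

-- ===== LEMMAS AND PROOFS =====

-- B's one-pass fold computes its three accumulators independently
theorem pv_foldB (tl : String) (l : List (String × Int)) (t0 : Int)
    (h0 : List (String × String × Int)) (u0 : PySem.Set String) :
    List.foldl
      (fun acc kv =>
        if PySem.Str.isIn (PySem.Str.lower kv.1) tl = true then
          (acc.1 + kv.2, acc.2.1 ++ [(kv.1, PySem.Str.lower kv.1, kv.2)],
            if PySem.Str.isIn " " kv.1 = true then
              PySem.Set.update acc.2.2 (PySem.Str.split₀ (PySem.Str.lower kv.1))
            else acc.2.2)
        else acc)
      (t0, h0, u0) l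
    = (t0 + (List.map Prod.snd
          (List.filter (fun kv => PySem.Str.isIn (PySem.Str.lower kv.1) tl) l)).sum,
       h0 ++ List.map (fun kv => (kv.1, PySem.Str.lower kv.1, kv.2))
          (List.filter (fun kv => PySem.Str.isIn (PySem.Str.lower kv.1) tl) l),
       List.foldl (fun s kv => PySem.Set.update s (PySem.Str.split₀ (PySem.Str.lower kv.1))) u0
         (List.filter (fun kv => PySem.Str.isIn " " kv.1
            && PySem.Str.isIn (PySem.Str.lower kv.1) tl) l)) := by
  induction l generalizing t0 h0 u0 with
  | nil => simp
  | cons a l ih =>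
    cases hm : PySem.Str.isIn (PySem.Str.lower a.1) tl <;>
      cases hs : PySem.Str.isIn " " a.1 <;>
        simp only [List.foldl_cons, List.filter_cons, hm, hs, Bool.and_false, Bool.and_true,
          Bool.false_eq_true, reduceIte, ih, List.map_cons, List.sum_cons, List.append_assoc,
          List.singleton_append] <;>
        refine Prod.ext ?_ (Prod.ext ?_ ?_) <;> simp [add_assoc]

-- splitting a filtered sum by a second Bool test
theorem pv_sum_filter_split (l : List (String × Int)) (p q : (String × Int) → Bool) :
    ((l.filter p).map Prod.snd).sum
      = ((l.filter (fun x => p x && q x)).map Prod.snd).sum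
        + ((l.filter (fun x => p x && !q x)).map Prod.snd).sum := by
  induction l with
  | nil => simp
  | cons a t ih =>
    by_cases hp : p a = true
    · by_cases hq : q a = true
      · simp [hp, hq, ih]; ring
      · simp only [Bool.not_eq_true] at hq
        simp [hp, hq, ih]; ring
    · simp only [Bool.not_eq_true] at hp
      simp [hp, ih]

-- ===== VERDICT (by name: the statement is the Claim_ definition above) =====
theorem estimate_search_volume_spec : Claim_equal_estimate_search_volume := by
  intro title svs _hdom hpre
  unfold Pre_estimate_search_volume at hpre
  unfold Spec_estimate_search_volume estimate_search_volume estimate_search_volume_alt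
  simp only []
  set tl := PySem.Str.lower title with htl
  -- B's single pass is three independent accumulators over the matching keywords
  rw [pv_foldB tl svs 0 [] PySem.Set.empty]
  dsimp only
  simp only [zero_add, List.nil_append]
  -- A's phrase-hit set is the filtered key list itself (keys are distinct)
  have hofl : PySem.Set.ofList
      (List.filter (fun k => PySem.Str.isIn " " k && PySem.Str.isIn (PySem.Str.lower k) tl)
        (List.map Prod.fst svs))
      = List.map Prod.fst
          (List.filter (fun kv => PySem.Str.isIn " " kv.1 && PySem.Str.isIn (PySem.Str.lower kv.1) tl)
            svs) := by
    rw [PySem.Set.ofList_eq_self_of_nodup _ (hpre.filter _), List.filter_map]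
    simp [Function.comp_def]
  rw [hofl, List.foldl_map]
  set U := List.foldl (fun s kv => PySem.Set.update s (PySem.Str.split₀ (PySem.Str.lower kv.1)))
      PySem.Set.empty
      (List.filter (fun kv => PySem.Str.isIn " " kv.1 && PySem.Str.isIn (PySem.Str.lower kv.1) tl)
        svs) with hU
  -- A's phrase sum: dict lookups give back the paired values
  rw [List.map_map]
  have hmap : List.map ((fun k => (PySem.Dict.mk svs).getD k 0) ∘ Prod.fst)
      (List.filter (fun kv => PySem.Str.isIn " " kv.1 && PySem.Str.isIn (PySem.Str.lower kv.1) tl)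
        svs)
      = List.map Prod.snd
          (List.filter (fun kv => PySem.Str.isIn " " kv.1 && PySem.Str.isIn (PySem.Str.lower kv.1) tl)
            svs) := by
    refine List.map_congr_left ?_
    intro kv hkv
    have hm : (kv.1, kv.2) ∈ (PySem.Dict.mk svs).items := by
      simpa using List.mem_of_mem_filter hkv
    have hk : (PySem.Dict.mk svs).keys.Nodup := by
      simpa [PySem.Dict.keys] using hpre
    simpa using PySem.Dict.getD_of_mem_items _ hm hk 0
  rw [hmap]
  -- B's correction: a sum over a filtered sublist of the matches
  rw [List.filter_map, List.map_map, List.filter_filter]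
  simp only [Function.comp_def]
  -- A's single-token loop: one if, then filter + sum
  rw [PySem.List.foldl_congr_mem' svs _
    (fun acc tv =>
      if (!PySem.Str.isIn " " tv.1
            && (PySem.Str.isIn (PySem.Str.lower tv.1) tl
                  && !(PySem.Set.contains U (PySem.Str.lower tv.1)))) = true
      then acc + tv.2 else acc) _
    (by intro x _ acc
        cases h1 : PySem.Str.isIn " " x.1 <;>
          simp only [h1, Bool.not_true, Bool.not_false, Bool.false_and, Bool.true_and,
            Bool.false_eq_true, reduceIte])]
  simp only [PySem.List.foldl_if_eq_foldl_filter]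
  simp only [PySem.List.foldl_add]
  -- split B's all-matches sum into phrases, corrected singles and free singles
  rw [pv_sum_filter_split svs (fun kv => PySem.Str.isIn (PySem.Str.lower kv.1) tl)
    (fun kv => PySem.Str.isIn " " kv.1)]
  rw [pv_sum_filter_split svs
    (fun kv => PySem.Str.isIn (PySem.Str.lower kv.1) tl && !PySem.Str.isIn " " kv.1)
    (fun kv => PySem.Set.contains U (PySem.Str.lower kv.1))]
  have e1 : List.filter (fun kv => PySem.Str.isIn (PySem.Str.lower kv.1) tl
        && PySem.Str.isIn " " kv.1) svs
      = List.filter (fun kv => PySem.Str.isIn " " kv.1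
        && PySem.Str.isIn (PySem.Str.lower kv.1) tl) svs :=
    List.filter_congr (by intro x _; exact Bool.and_comm _ _)
  have e2 : List.filter (fun kv => (PySem.Str.isIn (PySem.Str.lower kv.1) tl
          && !PySem.Str.isIn " " kv.1) && PySem.Set.contains U (PySem.Str.lower kv.1)) svs
      = List.filter (fun kv => (!PySem.Str.isIn " " kv.1
          && PySem.Set.contains U (PySem.Str.lower kv.1))
          && PySem.Str.isIn (PySem.Str.lower kv.1) tl) svs :=
    List.filter_congr (by
      intro x _
      cases hs : PySem.Str.isIn " " x.1 <;> cases hm : PySem.Str.isIn (PySem.Str.lower x.1) tl <;>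
        simp_all)
  have e3 : List.filter (fun kv => (PySem.Str.isIn (PySem.Str.lower kv.1) tl
          && !PySem.Str.isIn " " kv.1) && !PySem.Set.contains U (PySem.Str.lower kv.1)) svs
      = List.filter (fun kv => !PySem.Str.isIn " " kv.1
          && (PySem.Str.isIn (PySem.Str.lower kv.1) tl
                && !PySem.Set.contains U (PySem.Str.lower kv.1))) svs :=
    List.filter_congr (by
      intro x _
      cases hs : PySem.Str.isIn " " x.1 <;> cases hm : PySem.Str.isIn (PySem.Str.lower x.1) tl <;>
        simp_all)
  rw [e1, e2, e3]
  ring
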